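-- pv_equiv track=rewrite | github.com/gfedorkow/Whirlwind-Instruction-Simulator | Py/Tools/ww-ASCII-to-Flexo.py | format_tcodes
-- ===== SOURCE A (Python) =====
-- def format_tcodes(input_string, flexo_codes):
--     output_str = "; ascii string converted to flexo code:\n; "
--     for offset in range(0, len(input_string)):
--         s = input_string[offset]
--         output_str += s
--         if  s == '\n' and offset < len(input_string):
--             output_str += "; "
--     output_str += "\n"
--
--     addr = 0
--     output_str += '@T000: '
--     for f in flexo_codes:
--         output_str += "%06o  " % f
--         addr += 1
--         if addr % 8 == 0:
--             output_str += '\n@T%03o: ' % addr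
--     return output_str
-- ===== SOURCE B (Python) =====
-- # B: different decomposition -- phase 1 as a join over a per-char expansion; phase 2 iterates
-- # over chunk start addresses (range step 8) emitting each header with its 8-code slice,
-- # collecting parts in a list and joining once.
-- def format_tcodes(input_string, flexo_codes):
--     parts = ["; ascii string converted to flexo code:\n; ",
--              ''.join('\n; ' if c == '\n' else c for c in input_string),
--              '\n']
--     for addr in range(0, len(flexo_codes) + 1, 8):
--         parts.append('@T000: ' if addr == 0 else '\n@T%03o: ' % addr)
--         parts.extend('%06o  ' % f for f in flexo_codes[addr:addr + 8])
--     return ''.join(parts)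
-- ===== Notes on version B (the rewrite author's own statement) =====
-- stated objective: alternative
-- what changed: Phase 1 becomes a join over a per-character expansion instead of an indexed accumulator loop with an always-true offset guard; phase 2 becomes a recursive 8-code chunker over list slices (emitting each header and its chunk together, including the dangling trailing header) instead of a single fold carrying a running address counter tested with addr % 8.
import Mathlib
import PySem

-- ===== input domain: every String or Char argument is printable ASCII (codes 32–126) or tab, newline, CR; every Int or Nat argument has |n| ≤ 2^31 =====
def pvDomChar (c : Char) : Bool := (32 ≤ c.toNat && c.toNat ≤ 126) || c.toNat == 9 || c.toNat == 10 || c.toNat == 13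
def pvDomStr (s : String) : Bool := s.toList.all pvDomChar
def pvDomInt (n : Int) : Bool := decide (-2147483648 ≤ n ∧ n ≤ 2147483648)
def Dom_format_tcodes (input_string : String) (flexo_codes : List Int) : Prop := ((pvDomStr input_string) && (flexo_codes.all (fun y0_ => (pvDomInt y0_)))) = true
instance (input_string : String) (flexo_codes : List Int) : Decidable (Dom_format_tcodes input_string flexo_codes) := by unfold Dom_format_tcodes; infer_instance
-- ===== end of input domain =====

-- B rebuilds the same output by a different decomposition (join over per-char expansion; phase 2
-- iterates over chunk start addresses with 8-code slices instead of A's running-counter fold); objective: alternative.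

-- shared formatting helpers, ports of Python's '%0*o' (octal, zero-padded, sign in front)
def pvOct (n : Int) (w : Int) : List Char :=
  PySem.Chars.zfill ((if n < 0 then ['-'] else []) ++ Nat.toDigits 8 n.natAbs) w

-- '%06o  ' % f
def pvFmt6 (f : Int) : List Char := pvOct f 6 ++ [' ', ' ']

-- '\n@T%03o: ' % addr
def pvHdr (addr : Int) : List Char := '\n' :: '@' :: 'T' :: (pvOct addr 3 ++ [':', ' '])

-- ===== PORT A =====
def format_tcodes (input_string : String) (flexo_codes : List Int) : String :=
  let cs := input_string.toList
  let n : Int := PySem.Str.len input_string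
  -- for offset in range(0, len(input_string)): s = input_string[offset]; …
  let s1 := (PySem.List.pyRange 0 n 1).foldl
    (fun acc offset =>
      let s := PySem.List.pyGetD cs offset ' '
      let acc := acc ++ [s]
      if s = '\n' ∧ offset < n then acc ++ [';', ' '] else acc)
    ("; ascii string converted to flexo code:\n; ".toList)
  let s2 := s1 ++ ['\n'] ++ ['@', 'T', '0', '0', '0', ':', ' ']
  -- for f in flexo_codes: … addr += 1; if addr % 8 == 0: …
  let r := flexo_codes.foldl
    (fun (st : List Char × Int) f =>
      let s := st.1 ++ pvFmt6 f
      let addr := st.2 + 1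
      if PySem.Int.mod addr 8 = 0 then (s ++ pvHdr addr, addr) else (s, addr))
    (s2, 0)
  String.ofList r.1

-- ===== PORT B =====
def format_tcodes_alt (input_string : String) (flexo_codes : List Int) : String :=
  -- parts list + ''.join(parts) = flatten of the pieces in order;
  -- flexo_codes[addr:addr+8] = PySem.List.slice
  String.ofList
    ("; ascii string converted to flexo code:\n; ".toList
     ++ (input_string.toList.map (fun c => if c = '\n' then ['\n', ';', ' '] else [c])).flatten
     ++ ['\n']
     ++ ((PySem.List.pyRange 0 (PySem.List.len flexo_codes + 1) 8).map
          (fun addr =>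
            (if addr = 0 then ['@', 'T', '0', '0', '0', ':', ' '] else pvHdr addr)
            ++ ((PySem.List.slice flexo_codes (some addr) (some (addr + 8))).map pvFmt6).flatten)).flatten)

-- ===== PRECONDITION & SPEC =====
def Spec_format_tcodes (input_string : String) (flexo_codes : List Int) (out : String) : Prop := out = format_tcodes_alt input_string flexo_codes
instance (input_string : String) (flexo_codes : List Int) (out : String) : Decidable (Spec_format_tcodes input_string flexo_codes out) := by unfold Spec_format_tcodes; infer_instance

-- ===== CLAIM (what is proved, stated in full; the proofs are below) =====
def Claim_equal_format_tcodes : Prop := ∀ (input_string : String) (flexo_codes : List Int), Dom_format_tcodes input_string flexo_codes → Spec_format_tcodes input_string flexo_codes (format_tcodes input_string flexo_codes)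

-- ===== LEMMAS AND PROOFS =====

-- proof-side bridge: the common chunked shape both ports build
def pvTblock (codes : List Int) (addr : Int) : List Char :=
  let line := (if addr = 0 then ['@', 'T', '0', '0', '0', ':', ' '] else pvHdr addr)
              ++ ((codes.take 8).map pvFmt6).flatten
  if codes.length < 8 then line else line ++ pvTblock (codes.drop 8) (addr + 8)
termination_by codes.length
decreasing_by simp; omega

lemma pv_map_getD_range {α : Type} (cs : List α) (d : α) :
    (List.range cs.length).map (fun k => cs.getD k d) = cs := by
  apply List.ext_getElem
  · simp
  · intro i h1 h2
    simp [List.getD_eq_getElem?_getD, h2]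

-- phase 1: A's indexed loop builds init ++ flatten (map expand cs)
lemma pv_phase1 (s : String) (init : List Char) :
    (PySem.List.pyRange 0 (PySem.Str.len s) 1).foldl
      (fun acc offset =>
        let c := PySem.List.pyGetD s.toList offset ' '
        let acc := acc ++ [c]
        if c = '\n' ∧ offset < PySem.Str.len s then acc ++ [';', ' '] else acc)
      init
    = init ++ (s.toList.map (fun c => if c = '\n' then ['\n', ';', ' '] else [c])).flatten := by
  rw [PySem.Str.len_eq, PySem.List.pyRange_zero_natCast, List.foldl_map]
  rw [PySem.List.foldl_congr_mem _ _
      (fun acc k => acc ++ (if s.toList.getD k ' ' = '\n' then ['\n', ';', ' '] else [s.toList.getD k ' '])) init ?_]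
  · rw [PySem.List.foldl_append_eq_flatMap, List.flatMap_def]
    congr 1
    conv_rhs => rw [← pv_map_getD_range s.toList ' ']
    rw [List.map_map]
    simp only [Function.comp_def]
  · intro acc k hk
    simp only [List.mem_range] at hk
    have hk' : k < s.length := by simpa using hk
    simp only [PySem.List.pyGetD_natCast, List.getD]
    split <;> simp_all

-- one step of A's phase-2 loop, with the state made explicit
lemma pv_step (acc : List Char) (a f : Int) :
    (let s := (acc, a).1 ++ pvFmt6 f
     let addr := (acc, a).2 + 1
     if PySem.Int.mod addr 8 = 0 then (s ++ pvHdr addr, addr) else (s, addr))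
    = if PySem.Int.mod (a + 1) 8 = 0 then (acc ++ pvFmt6 f ++ pvHdr (a + 1), a + 1)
      else (acc ++ pvFmt6 f, a + 1) := rfl

lemma pv_ne8 {a : Int} (h : ¬ (a % 8 = 0)) : ¬ (PySem.Int.mod a 8 = 0) := by
  rw [PySem.Int.mod_eq_emod_of_pos (by norm_num : (0:Int) < 8)]; exact h

lemma pv_eq8 {a : Int} (h : a % 8 = 0) : PySem.Int.mod a 8 = 0 := by
  rw [PySem.Int.mod_eq_emod_of_pos (by norm_num : (0:Int) < 8)]; exact h

-- one unfolding of B's chunker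
lemma pvTblock_eq (codes : List Int) (addr : Int) :
    pvTblock codes addr
    = (if addr = 0 then ['@', 'T', '0', '0', '0', ':', ' '] else pvHdr addr)
      ++ ((codes.take 8).map pvFmt6).flatten
      ++ (if codes.length < 8 then [] else pvTblock (codes.drop 8) (addr + 8)) := by
  rw [pvTblock]; split <;> simp

-- phase 2: A's counter loop, started at a multiple of 8, builds B's chunked output
lemma pv_phase2 : ∀ n (codes : List Int), codes.length = n → ∀ (acc : List Char) (m : Nat),
    (codes.foldl
      (fun (st : List Char × Int) f =>
        let s := st.1 ++ pvFmt6 f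
        let addr := st.2 + 1
        if PySem.Int.mod addr 8 = 0 then (s ++ pvHdr addr, addr) else (s, addr))
      (acc, (8 * (m : Int)))).1
    = acc ++ ((codes.take 8).map pvFmt6).flatten
          ++ (if codes.length < 8 then [] else pvTblock (codes.drop 8) (8 * (m : Int) + 8)) := by
  intro n
  induction n using Nat.strong_induction_on with
  | _ n IH =>
  intro codes hlen acc m
  match codes with
  | [] =>

    simp [List.append_assoc]
  | [a1] =>
    rw [List.foldl_cons, pv_step, if_neg (pv_ne8 (by omega))]
    simp [List.append_assoc]
  | [a1, a2] =>
    rw [List.foldl_cons, pv_step, if_neg (pv_ne8 (by omega))]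
    rw [List.foldl_cons, pv_step, if_neg (pv_ne8 (by omega))]
    simp [List.append_assoc]
  | [a1, a2, a3] =>
    rw [List.foldl_cons, pv_step, if_neg (pv_ne8 (by omega))]
    rw [List.foldl_cons, pv_step, if_neg (pv_ne8 (by omega))]
    rw [List.foldl_cons, pv_step, if_neg (pv_ne8 (by omega))]
    simp [List.append_assoc]
  | [a1, a2, a3, a4] =>
    rw [List.foldl_cons, pv_step, if_neg (pv_ne8 (by omega))]
    rw [List.foldl_cons, pv_step, if_neg (pv_ne8 (by omega))]
    rw [List.foldl_cons, pv_step, if_neg (pv_ne8 (by omega))]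
    rw [List.foldl_cons, pv_step, if_neg (pv_ne8 (by omega))]
    simp [List.append_assoc]
  | [a1, a2, a3, a4, a5] =>
    rw [List.foldl_cons, pv_step, if_neg (pv_ne8 (by omega))]
    rw [List.foldl_cons, pv_step, if_neg (pv_ne8 (by omega))]
    rw [List.foldl_cons, pv_step, if_neg (pv_ne8 (by omega))]
    rw [List.foldl_cons, pv_step, if_neg (pv_ne8 (by omega))]
    rw [List.foldl_cons, pv_step, if_neg (pv_ne8 (by omega))]
    simp [List.append_assoc]
  | [a1, a2, a3, a4, a5, a6] =>
    rw [List.foldl_cons, pv_step, if_neg (pv_ne8 (by omega))]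
    rw [List.foldl_cons, pv_step, if_neg (pv_ne8 (by omega))]
    rw [List.foldl_cons, pv_step, if_neg (pv_ne8 (by omega))]
    rw [List.foldl_cons, pv_step, if_neg (pv_ne8 (by omega))]
    rw [List.foldl_cons, pv_step, if_neg (pv_ne8 (by omega))]
    rw [List.foldl_cons, pv_step, if_neg (pv_ne8 (by omega))]
    simp [List.append_assoc]
  | [a1, a2, a3, a4, a5, a6, a7] =>
    rw [List.foldl_cons, pv_step, if_neg (pv_ne8 (by omega))]
    rw [List.foldl_cons, pv_step, if_neg (pv_ne8 (by omega))]
    rw [List.foldl_cons, pv_step, if_neg (pv_ne8 (by omega))]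
    rw [List.foldl_cons, pv_step, if_neg (pv_ne8 (by omega))]
    rw [List.foldl_cons, pv_step, if_neg (pv_ne8 (by omega))]
    rw [List.foldl_cons, pv_step, if_neg (pv_ne8 (by omega))]
    rw [List.foldl_cons, pv_step, if_neg (pv_ne8 (by omega))]
    simp [List.append_assoc]
  | a1 :: a2 :: a3 :: a4 :: a5 :: a6 :: a7 :: a8 :: rest =>
    rw [List.foldl_cons, pv_step, if_neg (pv_ne8 (by omega))]
    rw [List.foldl_cons, pv_step, if_neg (pv_ne8 (by omega))]
    rw [List.foldl_cons, pv_step, if_neg (pv_ne8 (by omega))]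
    rw [List.foldl_cons, pv_step, if_neg (pv_ne8 (by omega))]
    rw [List.foldl_cons, pv_step, if_neg (pv_ne8 (by omega))]
    rw [List.foldl_cons, pv_step, if_neg (pv_ne8 (by omega))]
    rw [List.foldl_cons, pv_step, if_neg (pv_ne8 (by omega))]
    rw [List.foldl_cons, pv_step, if_pos (pv_eq8 (by omega))]
    have hcast : (8 * (m : Int) + 1 + 1 + 1 + 1 + 1 + 1 + 1 + 1 : Int) = 8 * ((m + 1 : Nat) : Int) := by
      push_cast; ring
    rw [hcast]
    have hlt : rest.length < n := by simp at hlen; omega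
    rw [IH rest.length hlt rest rfl _ (m + 1)]
    rw [List.drop_succ_cons, List.drop_succ_cons, List.drop_succ_cons, List.drop_succ_cons,
        List.drop_succ_cons, List.drop_succ_cons, List.drop_succ_cons, List.drop_succ_cons,
        List.drop_zero]
    rw [if_neg (show ¬ (a1 :: a2 :: a3 :: a4 :: a5 :: a6 :: a7 :: a8 :: rest).length < 8 by
          simp only [List.length_cons]; omega)]
    rw [pvTblock_eq rest (8 * (m : Int) + 8)]
    rw [if_neg (show ¬ (8 * (m : Int) + 8 = 0) by omega)]
    have h1 : ((m + 1 : Nat) : Int) = (m : Int) + 1 := by push_cast; ring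
    rw [h1]
    have h2 : (8 * ((m : Int) + 1) : Int) = 8 * (m : Int) + 8 := by ring
    rw [h2]
    simp [List.append_assoc]


lemma pv_pyRange8_cons (a b : Int) (h : a < b) :
    PySem.List.pyRange a b 8 = a :: PySem.List.pyRange (a + 8) b 8 := by
  rw [PySem.List.pyRange_of_pos _ _ (by norm_num : (0:Int) < 8),
      PySem.List.pyRange_of_pos _ _ (by norm_num : (0:Int) < 8), if_pos h]
  by_cases h2 : a + 8 < b
  · rw [if_pos h2]
    have hN : ((b - a + 8 - 1) / 8).toNat = ((b - (a + 8) + 8 - 1) / 8).toNat + 1 := by omega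
    rw [hN, List.range_succ_eq_map, List.map_cons, List.map_map]
    congr 1
    · simp
    · apply List.map_congr_left
      intro x _
      simp
      ring
  · rw [if_neg h2]
    have hN : ((b - a + 8 - 1) / 8).toNat = 1 := by omega
    rw [hN]
    simp

-- B's range-over-chunk-starts loop builds the chunked shape
lemma pvB : ∀ k (full : List Int) (m : Nat), full.length = 8 * m + k →
    ((PySem.List.pyRange (8 * (m : Int)) ((full.length : Int) + 1) 8).map
        (fun addr =>
          (if addr = 0 then ['@', 'T', '0', '0', '0', ':', ' '] else pvHdr addr)
          ++ ((PySem.List.slice full (some addr) (some (addr + 8))).map pvFmt6).flatten)).flatten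
    = pvTblock (full.drop (8 * m)) (8 * (m : Int)) := by
  intro k
  induction k using Nat.strong_induction_on with
  | _ k IH =>
  intro full m hlen
  have hcons : (8 * (m : Int)) < (full.length : Int) + 1 := by omega
  rw [pv_pyRange8_cons _ _ hcons, List.map_cons, List.flatten_cons]
  have hslice : PySem.List.slice full (some (8 * (m : Int))) (some (8 * (m : Int) + 8))
      = (full.drop (8 * m)).take 8 := by
    have h1 : (8 * (m : Int)) = ((8 * m : Nat) : Int) := by push_cast; ring
    have h2 : (8 * (m : Int) + 8 : Int) = ((8 * m : Nat) : Int) + ((8 : Nat) : Int) := by push_cast; ring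
    rw [h2, h1]
    exact PySem.List.slice_natCast_add full (8 * m) 8
  rw [hslice]
  by_cases hk : k < 8
  · have hnil : PySem.List.pyRange (8 * (m : Int) + 8) ((full.length : Int) + 1) 8 = [] := by
      rw [PySem.List.pyRange_of_pos _ _ (by norm_num : (0:Int) < 8), if_neg (by omega)]
      simp
    rw [hnil, pvTblock_eq (List.drop (8 * m) full) (8 * (m : Int)),
        if_pos (show (List.drop (8 * m) full).length < 8 by rw [List.length_drop]; omega)]
    simp
  · have hnext : full.length = 8 * (m + 1) + (k - 8) := by omega
    have h8 : (8 * (m : Int) + 8) = 8 * ((m + 1 : Nat) : Int) := by push_cast; ring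
    rw [h8, IH (k - 8) (by omega) full (m + 1) hnext]
    rw [pvTblock_eq (List.drop (8 * m) full) (8 * (m : Int)),
        if_neg (show ¬ (List.drop (8 * m) full).length < 8 by rw [List.length_drop]; omega)]
    rw [show List.drop (8 * (m + 1)) full = List.drop 8 (List.drop (8 * m) full) by
          rw [List.drop_drop, show (8 * m + 8) = 8 * (m + 1) from by ring],
        show (8 * ((m + 1 : Nat) : Int)) = 8 * (m : Int) + 8 from by push_cast; ring]

-- ===== VERDICT (by name: the statement is the Claim_ definition above) =====
theorem format_tcodes_spec : Claim_equal_format_tcodes := by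
  intro input_string flexo_codes _
  unfold Spec_format_tcodes format_tcodes format_tcodes_alt
  simp only [pv_phase1]
  have h2 := pv_phase2 flexo_codes.length flexo_codes rfl
    (("; ascii string converted to flexo code:\n; ".toList
       ++ (input_string.toList.map (fun c => if c = '\n' then ['\n', ';', ' '] else [c])).flatten)
      ++ ['\n'] ++ ['@', 'T', '0', '0', '0', ':', ' ']) 0
  simp only [Nat.cast_zero, mul_zero, zero_add] at h2
  rw [h2]
  have hB := pvB flexo_codes.length flexo_codes 0 (by omega)
  simp only [Nat.cast_zero, mul_zero, List.drop_zero] at hB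
  rw [PySem.List.len_eq, hB]
  rw [pvTblock_eq flexo_codes 0, if_pos rfl]
  simp [List.append_assoc]
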